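-- pv_equiv track=rewrite | github.com/TuanBao0711/TuanBao0711.github.io | Python_code_ptit/141.py | Solve
-- ===== SOURCE A (Python) =====
-- def Solve(n):
-- 	lst = []
-- 	count = 0
-- 	while n:
-- 		lst.append(n%10)
-- 		n//=10
-- 	for i in range(len(lst)-1):
-- 		if lst[i] <= lst[i+1]:
-- 			count+=1
-- 	# if count > 1: return False
-- 	# else: return True
-- 	return count
-- ===== SOURCE B (Python) =====
-- def Solve(n):
--     # Single pass: keep the previously extracted (less significant) digit and
--     # compare it with each next digit as it appears; no intermediate list.
--     count = 0
--     prev = n % 10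
--     n //= 10
--     while n:
--         cur = n % 10
--         if prev <= cur:
--             count += 1
--         prev = cur
--         n //= 10
--     return count
-- ===== Notes on version B (the rewrite author's own statement) =====
-- stated objective: simpler
-- what changed: B fuses digit extraction and pair counting into one arithmetic pass keeping only the previous digit, instead of building a full digit list and then looping over its indices.
import Mathlib
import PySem

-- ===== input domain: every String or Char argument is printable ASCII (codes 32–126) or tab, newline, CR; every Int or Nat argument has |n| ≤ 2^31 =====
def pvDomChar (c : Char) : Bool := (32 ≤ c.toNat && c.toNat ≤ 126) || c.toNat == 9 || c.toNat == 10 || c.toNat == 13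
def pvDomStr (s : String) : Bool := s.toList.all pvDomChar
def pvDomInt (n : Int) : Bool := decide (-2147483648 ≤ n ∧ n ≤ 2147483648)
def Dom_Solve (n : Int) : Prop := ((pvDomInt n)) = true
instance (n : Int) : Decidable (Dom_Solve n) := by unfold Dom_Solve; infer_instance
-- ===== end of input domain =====

-- B fuses digit extraction and pair counting into one arithmetic pass keeping only
-- the previous digit, instead of building a digit list and looping over its indices.
-- Both Pythons diverge on n < 0 (floor-division never reaches 0); Pre_ excludes those inputs.

-- ===== PORT A =====
-- 'while n: lst.append(n%10); n//=10'.  The fuel argument is only a totality guard: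
-- on n ≥ 0 (Pre_) the loop runs at most n.toNat times, so fuel n.toNat+1 never runs out.
-- For n < 0 the Python loop never terminates (excluded by Pre_Solve).
def SolveDigits (n : Int) (lst : List Int) : Nat → List Int
  | 0 => lst
  | f + 1 =>
    if n ≠ 0 then SolveDigits (PySem.Int.floordiv n 10) (lst ++ [PySem.Int.mod n 10]) f
    else lst

def Solve (n : Int) : Int :=
  let lst := SolveDigits n [] (n.toNat + 1)
  (PySem.List.pyRange 0 ((lst.length : Int) - 1) 1).foldl
    (fun count i =>
      if PySem.List.pyGetD lst i 0 ≤ PySem.List.pyGetD lst (i + 1) 0 then count + 1 else count) 0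

-- ===== PORT B =====
-- 'while n: cur=n%10; if prev<=cur: count+=1; prev=cur; n//=10'.  Same fuel guard, same note on n < 0.
def SolveAltLoop (n prev count : Int) : Nat → Int
  | 0 => count
  | f + 1 =>
    if n ≠ 0 then
      let cur := PySem.Int.mod n 10
      SolveAltLoop (PySem.Int.floordiv n 10) cur (if prev ≤ cur then count + 1 else count) f
    else count

def Solve_alt (n : Int) : Int :=
  SolveAltLoop (PySem.Int.floordiv n 10) (PySem.Int.mod n 10) 0 ((PySem.Int.floordiv n 10).toNat + 1)

-- ===== PRECONDITION & SPEC =====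
-- Pre_ excludes n < 0, on which both Python programs loop forever (n//10 never reaches 0).
def Pre_Solve (n : Int) : Prop := 0 ≤ n
instance (n : Int) : Decidable (Pre_Solve n) := by unfold Pre_Solve; infer_instance
def pvWitness_Solve : Int := (4321)

def Spec_Solve (n : Int) (out : Int) : Prop := out = Solve_alt n
instance (n : Int) (out : Int) : Decidable (Spec_Solve n out) := by unfold Spec_Solve; infer_instance

-- ===== CLAIM (what is proved, stated in full; the proofs are below) =====
def Claim_equal_Solve : Prop := ∀ (n : Int), Dom_Solve n → Pre_Solve n → Spec_Solve n (Solve n)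

-- ===== LEMMAS AND PROOFS =====

-- the digit list of n, least significant first
def digitsN (n : Int) : Nat → List Int
  | 0 => []
  | f + 1 => if n ≠ 0 then PySem.Int.mod n 10 :: digitsN (PySem.Int.floordiv n 10) f else []

-- count of adjacent pairs a ≤ b in a list
def pc : List Int → Int
  | a :: b :: t => (if a ≤ b then (1 : Int) else 0) + pc (b :: t)
  | _ => 0

theorem pc_nil : pc [] = 0 := rfl
theorem pc_single (a : Int) : pc [a] = 0 := rfl
theorem pc_cons (a b : Int) (t : List Int) :
    pc (a :: b :: t) = (if a ≤ b then (1 : Int) else 0) + pc (b :: t) := rfl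

theorem floordiv_ten_lt {n : Int} (h : 0 < n) :
    (PySem.Int.floordiv n 10).toNat < n.toNat := by
  have e : PySem.Int.floordiv n 10 = n / 10 := PySem.Int.floordiv_eq_ediv_of_pos (by norm_num)
  rw [e]; omega

theorem floordiv_ten_nonneg {n : Int} (h : 0 ≤ n) : 0 ≤ PySem.Int.floordiv n 10 := by
  have e : PySem.Int.floordiv n 10 = n / 10 := PySem.Int.floordiv_eq_ediv_of_pos (by norm_num)
  rw [e]; omega

-- digitsN is independent of the fuel once the fuel exceeds n.toNat (n ≥ 0)
theorem digitsN_fuel : ∀ (f g : Nat) (n : Int), 0 ≤ n → n.toNat < f → n.toNat < g →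
    digitsN n f = digitsN n g := by
  intro f
  induction f with
  | zero => intro g n _ hf; omega
  | succ f ih =>
    intro g n hn hf hg
    cases g with
    | zero => omega
    | succ g =>
      by_cases h : n = 0
      · subst h; simp [digitsN]
      · have hpos : 0 < n := by omega
        rw [digitsN, digitsN, if_pos h, if_pos h,
          ih g _ (floordiv_ten_nonneg hn) (by have := floordiv_ten_lt hpos; omega)
            (by have := floordiv_ten_lt hpos; omega)]

theorem SolveDigits_eq : ∀ (f : Nat) (n : Int), 0 ≤ n → n.toNat < f →
    ∀ lst, SolveDigits n lst f = lst ++ digitsN n f := by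
  intro f
  induction f with
  | zero => intro n _ hf; omega
  | succ f ih =>
    intro n hn hf lst
    by_cases h : n = 0
    · subst h; simp [SolveDigits, digitsN]
    · have hpos : 0 < n := by omega
      rw [SolveDigits, if_pos h, digitsN, if_pos h,
        ih _ (floordiv_ten_nonneg hn) (by have := floordiv_ten_lt hpos; omega)]
      simp

theorem countFold (lst : List Int) (c : Int) :
    (PySem.List.pyRange 0 ((lst.length : Int) - 1) 1).foldl
      (fun count i =>
        if PySem.List.pyGetD lst i 0 ≤ PySem.List.pyGetD lst (i + 1) 0 then count + 1 else count)
      c = c + pc lst := by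
  induction lst generalizing c with
  | nil => simp [PySem.List.pyRange_one_eq_nil, pc_nil]
  | cons a l ih =>
    cases l with
    | nil =>
        simp [PySem.List.pyRange_one_eq_nil, pc_single]
    | cons b t =>
        have hlen : ((((a :: b :: t).length : Int)) - 1) = ((b :: t).length : Int) := by
          simp
        rw [hlen]
        have hpos : (0 : Int) < ((b :: t).length : Int) := by
          simp
        rw [PySem.List.pyRange_one_cons hpos]
        simp only [List.foldl_cons]
        have h0 : PySem.List.pyGetD (a :: b :: t) 0 0 = a := by
          simp [PySem.List.pyGetD_zero_cons]
        have h1 : PySem.List.pyGetD (a :: b :: t) (0 + 1) 0 = b := by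
          have e : ((0 : Int) + 1) = ((1 : Nat) : Int) := by norm_num
          rw [e, PySem.List.pyGetD_natCast]; rfl
        rw [h0, h1]
        -- shift the remaining range by one and reuse the IH for (b :: t)
        have ih' := ih (c := if a ≤ b then c + 1 else c)
        rw [PySem.List.pyRange_one, List.foldl_map] at ih' ⊢
        have hnn : ((((b :: t).length : Int)) - (0 + 1)).toNat
            = ((((b :: t).length : Int) - 1) - 0).toNat := by omega
        rw [hnn]
        have hfun : (fun (count : Int) (k : Nat) =>
            if PySem.List.pyGetD (a :: b :: t) ((0 + 1) + (k : Int)) 0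
              ≤ PySem.List.pyGetD (a :: b :: t) ((0 + 1) + (k : Int) + 1) 0
            then count + 1 else count)
            = (fun (count : Int) (k : Nat) =>
            if PySem.List.pyGetD (b :: t) ((0 : Int) + (k : Int)) 0
              ≤ PySem.List.pyGetD (b :: t) ((0 : Int) + (k : Int) + 1) 0
            then count + 1 else count) := by
          funext count k
          have e1 : ((0 : Int) + 1) + (k : Int) = ((k + 1 : Nat) : Int) := by push_cast; ring
          rw [e1]
          have e2 : (((k + 1 : Nat) : Int)) + 1 = ((k + 2 : Nat) : Int) := by push_cast; ring
          rw [e2]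
          have e3 : ((0 : Int)) + (k : Int) = ((k : Nat) : Int) := by ring
          rw [e3]
          have e4 : (((k : Nat) : Int)) + 1 = ((k + 1 : Nat) : Int) := by push_cast; ring
          rw [e4, PySem.List.pyGetD_natCast, PySem.List.pyGetD_natCast,
            PySem.List.pyGetD_natCast, PySem.List.pyGetD_natCast]
          rfl
        rw [hfun, ih', pc_cons]
        split_ifs <;> ring

theorem altLoop_eq : ∀ (f : Nat) (n : Int), 0 ≤ n → n.toNat < f → ∀ prev c,
    SolveAltLoop n prev c f = c + pc (prev :: digitsN n f) := by
  intro f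
  induction f with
  | zero => intro n _ hf; omega
  | succ f ih =>
    intro n hn hf prev c
    by_cases h : n = 0
    · subst h; simp [SolveAltLoop, digitsN, pc_single]
    · have hpos : 0 < n := by omega
      rw [SolveAltLoop, if_pos h, digitsN, if_pos h,
        ih _ (floordiv_ten_nonneg hn) (by have := floordiv_ten_lt hpos; omega), pc_cons]
      split_ifs <;> ring

-- ===== VERDICT (by name: the statement is the Claim_ definition above) =====
theorem Solve_spec : Claim_equal_Solve := by
  intro n _ hn
  unfold Spec_Solve Solve Solve_alt
  have hn0 : (0 : Int) ≤ n := hn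
  have hfd0 : 0 ≤ PySem.Int.floordiv n 10 := floordiv_ten_nonneg hn0
  rw [SolveDigits_eq (n.toNat + 1) n hn0 (Nat.lt_succ_self _), List.nil_append, countFold]
  rw [altLoop_eq ((PySem.Int.floordiv n 10).toNat + 1) _ hfd0 (Nat.lt_succ_self _)]
  by_cases h : n = 0
  · subst h
    have e1 : PySem.Int.floordiv 0 10 = 0 := by decide
    have e2 : PySem.Int.mod 0 10 = 0 := by decide
    rw [e1, e2]
    simp [digitsN, pc_nil, pc_single]
  · have hpos : 0 < n := by omega
    have hstep : digitsN n (n.toNat + 1)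
        = PySem.Int.mod n 10 :: digitsN (PySem.Int.floordiv n 10) n.toNat := by
      rw [digitsN, if_pos h]
    rw [hstep,
      digitsN_fuel n.toNat ((PySem.Int.floordiv n 10).toNat + 1) _ hfd0
        (floordiv_ten_lt hpos) (by omega)]
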